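-- pv_equiv track=rewrite | github.com/aroth85/hapclone-cnasim-experiments | scripts/hmmcopy/plot_cnv_profile.py | sort_chroms
-- ===== SOURCE A (Python) =====
-- def sort_chroms(chroms):
--     numeric = []
--
--     string = []
--
--     for c in chroms:
--         try:
--             numeric.append(int(c))
--
--         except ValueError:
--             string.append(c)
--
--     return [str(x) for x in sorted(numeric)] + list(sorted(string))
-- ===== SOURCE B (Python) =====
-- def sort_chroms(chroms):
--     def key(c):
--         try:
--             return (0, int(c), '')
--         except ValueError:
--             return (1, 0, c)
--
--     def norm(c):
--         try:
--             return str(int(c))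
--         except ValueError:
--             return c
--
--     return [norm(c) for c in sorted(chroms, key=key)]
-- ===== Notes on version B (the rewrite author's own statement) =====
-- stated objective: alternative
-- what changed: Replaces A's partition-into-two-lists, two separate sorts and concatenation by a single stability-keyed sort of the whole list (key (0, int(c)) for int-parsable elements, (1, c) for the rest) followed by one normalization pass.
import Mathlib
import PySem

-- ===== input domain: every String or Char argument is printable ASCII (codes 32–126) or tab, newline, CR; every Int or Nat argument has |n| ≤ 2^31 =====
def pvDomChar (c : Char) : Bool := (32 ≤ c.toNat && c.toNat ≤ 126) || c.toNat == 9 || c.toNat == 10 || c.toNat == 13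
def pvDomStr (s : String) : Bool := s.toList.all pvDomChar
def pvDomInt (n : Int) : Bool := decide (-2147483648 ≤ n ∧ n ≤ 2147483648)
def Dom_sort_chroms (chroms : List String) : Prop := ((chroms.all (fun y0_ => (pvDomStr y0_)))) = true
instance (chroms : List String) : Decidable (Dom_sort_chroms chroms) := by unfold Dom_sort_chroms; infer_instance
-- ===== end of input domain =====

-- B replaces A's partition-into-two-lists + two sorts + concatenation by ONE stability-keyed
-- sort of the whole list (key (0, int(c)) for int-parsable elements, (1, c) otherwise)
-- followed by one normalization pass; same return value, no speed claim.

-- ===== PORT A =====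
-- the for-loop with its two .append targets, as a fold over the pair (numeric, string)
def sort_chroms (chroms : List String) : List String :=
  let p := chroms.foldl
    (fun (acc : List Int × List String) c =>
      match PySem.Int.ofStr? c with          -- int(c); none = ValueError
      | some n => (acc.1 ++ [n], acc.2)
      | none   => (acc.1, acc.2 ++ [c]))
    (([] : List Int), ([] : List String))
  (PySem.List.sorted p.1 (fun x => x) false).map PySem.Int.toStr
    ++ PySem.List.sorted p.2 (fun x => x) false

-- ===== PORT B =====
-- Python's '<' on B's key tuples (0, int(a), ...) / (1, ..., a), expanded componentwise
-- (PYSEM.md: a heterogeneous tuple key has no single Lean key type; compare the components explicitly)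
def pvKeyLt (a b : String) : Bool :=
  match PySem.Int.ofStr? a, PySem.Int.ofStr? b with
  | some m, some n => decide (m < n)     -- tags 0 = 0: compare ints
  | some _, none   => true               -- tag 0 < tag 1
  | none,   some _ => false              -- tag 1 > tag 0
  | none,   none   => decide (a < b)     -- tags 1 = 1: compare strings

-- norm(c): str(int(c)), or c unchanged on ValueError
def pvNorm (c : String) : String :=
  match PySem.Int.ofStr? c with
  | some n => PySem.Int.toStr n
  | none   => c

-- sorted(chroms, key=key) is PySem's stable-sort loop shape (PySem.List.sorted_eq_foldl_insertBy)
-- with the tuple-key comparison pvKeyLt; then the [norm(c) for c in …] pass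
def sort_chroms_alt (chroms : List String) : List String :=
  (chroms.foldl (fun acc x => PySem.List.insertBy pvKeyLt x acc) []).map pvNorm

-- ===== PRECONDITION & SPEC =====
def Spec_sort_chroms (chroms : List String) (out : List String) : Prop := out = sort_chroms_alt chroms
instance (chroms : List String) (out : List String) : Decidable (Spec_sort_chroms chroms out) := by unfold Spec_sort_chroms; infer_instance

-- ===== CLAIM (what is proved, stated in full; the proofs are below) =====
def Claim_equal_sort_chroms : Prop := ∀ (chroms : List String), Dom_sort_chroms chroms → Spec_sort_chroms chroms (sort_chroms chroms)

-- ===== LEMMAS AND PROOFS =====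

-- "int(c) succeeds" and the parsed value (total; only used under pvNum filters)
def pvNum (c : String) : Bool := (PySem.Int.ofStr? c).isSome
def pvIntv (c : String) : Int := (PySem.Int.ofStr? c).getD 0

lemma pvKeyLt_num_num {a b : String} (ha : pvNum a = true) (hb : pvNum b = true) :
    pvKeyLt a b = decide (pvIntv a < pvIntv b) := by
  unfold pvNum at ha hb
  obtain ⟨m, hm⟩ := Option.isSome_iff_exists.mp ha
  obtain ⟨n, hn⟩ := Option.isSome_iff_exists.mp hb
  simp [pvKeyLt, pvIntv, hm, hn]

lemma pvKeyLt_num_str {a b : String} (ha : pvNum a = true) (hb : pvNum b = false) :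
    pvKeyLt a b = true := by
  unfold pvNum at ha hb
  obtain ⟨m, hm⟩ := Option.isSome_iff_exists.mp ha
  simp [Option.isSome_eq_false_iff, Option.isNone_iff_eq_none] at hb
  simp [pvKeyLt, hm, hb]

lemma pvKeyLt_str_num {a b : String} (ha : pvNum a = false) (hb : pvNum b = true) :
    pvKeyLt a b = false := by
  unfold pvNum at ha hb
  obtain ⟨n, hn⟩ := Option.isSome_iff_exists.mp hb
  simp [Option.isSome_eq_false_iff, Option.isNone_iff_eq_none] at ha
  simp [pvKeyLt, hn, ha]

lemma pvKeyLt_str_str {a b : String} (ha : pvNum a = false) (hb : pvNum b = false) :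
    pvKeyLt a b = decide (a < b) := by
  unfold pvNum at ha hb
  simp [Option.isSome_eq_false_iff, Option.isNone_iff_eq_none] at ha hb
  simp [pvKeyLt, ha, hb]

lemma pvNorm_num {c : String} (h : pvNum c = true) : pvNorm c = PySem.Int.toStr (pvIntv c) := by
  unfold pvNum at h
  obtain ⟨n, hn⟩ := Option.isSome_iff_exists.mp h
  simp [pvNorm, pvIntv, hn]

lemma pvNorm_str {c : String} (h : pvNum c = false) : pvNorm c = c := by
  unfold pvNum at h
  simp [Option.isSome_eq_false_iff, Option.isNone_iff_eq_none] at h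
  simp [pvNorm, h]

-- insertion lands left of a suffix the element is before everywhere
lemma insertBy_append_all_before {α : Type} (before : α → α → Bool) (x : α) :
    ∀ (L0 L1 : List α), (∀ b ∈ L1, before x b = true) →
      PySem.List.insertBy before x (L0 ++ L1) = PySem.List.insertBy before x L0 ++ L1 := by
  intro L0
  induction L0 with
  | nil =>
    intro L1 h
    cases L1 with
    | nil => rfl
    | cons b t => simp [PySem.List.insertBy, h b (by simp)]
  | cons y L0 ih =>
    intro L1 h
    by_cases hy : before x y = true
    · simp [PySem.List.insertBy, hy]
    · simp only [Bool.not_eq_true] at hy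
      simp [PySem.List.insertBy, hy, ih L1 h]

-- insertion passes over a prefix the element is before nowhere
lemma insertBy_append_all_not_before {α : Type} (before : α → α → Bool) (x : α) :
    ∀ (L0 L1 : List α), (∀ b ∈ L0, before x b = false) →
      PySem.List.insertBy before x (L0 ++ L1) = L0 ++ PySem.List.insertBy before x L1 := by
  intro L0
  induction L0 with
  | nil => intro L1 _; rfl
  | cons y L0 ih =>
    intro L1 h
    simp [PySem.List.insertBy, h y (by simp), ih L1 (fun b hb => h b (by simp [hb]))]

lemma insertBy_congr {α : Type} (before before' : α → α → Bool) (x : α) :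
    ∀ (ys : List α), (∀ y ∈ ys, before x y = before' x y) →
      PySem.List.insertBy before x ys = PySem.List.insertBy before' x ys := by
  intro ys
  induction ys with
  | nil => intro _; rfl
  | cons y t ih =>
    intro h
    by_cases hy : before' x y = true
    · simp [PySem.List.insertBy, h y (by simp), hy]
    · simp only [Bool.not_eq_true] at hy
      simp [PySem.List.insertBy, h y (by simp), hy,
        ih (fun b hb => h b (by simp [hb]))]

-- comparator congruence for the whole insertion-sort fold, on a class closed list
lemma foldl_insertBy_congr {α : Type} (P : α → Bool) (before before' : α → α → Bool)
    (hcmp : ∀ a b, P a = true → P b = true → before a b = before' a b) :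
    ∀ (ys acc : List α), (∀ y ∈ ys, P y = true) → (∀ y ∈ acc, P y = true) →
      ys.foldl (fun acc x => PySem.List.insertBy before x acc) acc
        = ys.foldl (fun acc x => PySem.List.insertBy before' x acc) acc := by
  intro ys
  induction ys with
  | nil => intro acc _ _; rfl
  | cons x t ih =>
    intro acc hys hacc
    have hx : P x = true := hys x (by simp)
    have h1 : PySem.List.insertBy before x acc = PySem.List.insertBy before' x acc :=
      insertBy_congr _ _ _ acc (fun y hy => hcmp x y hx (hacc y hy))
    simp only [List.foldl_cons, h1]
    exact ih _ (fun y hy => hys y (by simp [hy]))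
      (fun y hy => by
        rcases (PySem.List.mem_insertBy before' x y acc).mp hy with h | h
        · exact h ▸ hx
        · exact hacc y h)

-- the stable sort splits at the class boundary: numerics first, strings after
lemma foldl_insertBy_split :
    ∀ (xs L0 L1 : List String), (∀ y ∈ L0, pvNum y = true) → (∀ y ∈ L1, pvNum y = false) →
      xs.foldl (fun acc x => PySem.List.insertBy pvKeyLt x acc) (L0 ++ L1)
        = (xs.filter pvNum).foldl (fun acc x => PySem.List.insertBy pvKeyLt x acc) L0
          ++ (xs.filter (fun c => !pvNum c)).foldl (fun acc x => PySem.List.insertBy pvKeyLt x acc) L1 := by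
  intro xs
  induction xs with
  | nil => intro L0 L1 _ _; rfl
  | cons x t ih =>
    intro L0 L1 h0 h1
    by_cases hx : pvNum x = true
    · have hstep : PySem.List.insertBy pvKeyLt x (L0 ++ L1)
          = PySem.List.insertBy pvKeyLt x L0 ++ L1 :=
        insertBy_append_all_before _ _ _ _ (fun b hb => pvKeyLt_num_str hx (h1 b hb))
      simp only [List.foldl_cons, hstep, List.filter_cons, hx, Bool.not_true,
        if_true, Bool.false_eq_true, if_false]
      exact ih _ L1 (fun y hy => by
        rcases (PySem.List.mem_insertBy pvKeyLt x y L0).mp hy with h | h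
        · exact h ▸ hx
        · exact h0 y h) h1
    · simp only [Bool.not_eq_true] at hx
      have hstep : PySem.List.insertBy pvKeyLt x (L0 ++ L1)
          = L0 ++ PySem.List.insertBy pvKeyLt x L1 :=
        insertBy_append_all_not_before _ _ _ _ (fun b hb => pvKeyLt_str_num hx (h0 b hb))
      simp only [List.foldl_cons, hstep, List.filter_cons, hx, Bool.not_false,
        Bool.false_eq_true, if_false, if_true]
      exact ih L0 _ h0 (fun y hy => by
        rcases (PySem.List.mem_insertBy pvKeyLt x y L1).mp hy with h | h
        · exact h ▸ hx
        · exact h1 y h)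

-- A's for-loop: numeric collects the parsed values of the int-parsable elements, string the rest
lemma sort_chroms_loop :
    ∀ (xs : List String) (a : List Int) (b : List String),
      xs.foldl
        (fun (acc : List Int × List String) c =>
          match PySem.Int.ofStr? c with
          | some n => (acc.1 ++ [n], acc.2)
          | none   => (acc.1, acc.2 ++ [c])) (a, b)
        = (a ++ (xs.filter pvNum).map pvIntv, b ++ xs.filter (fun c => !pvNum c)) := by
  intro xs
  induction xs with
  | nil => intro a b; simp
  | cons c t ih =>
    intro a b
    cases hc : PySem.Int.ofStr? c with
    | some n =>
      have hnum : pvNum c = true := by simp [pvNum, hc]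
      have hv : pvIntv c = n := by simp [pvIntv, hc]
      simp [hc, ih, hnum, hv]
    | none =>
      have hnum : pvNum c = false := by simp [pvNum, hc]
      simp [hc, ih, hnum]

-- mapping the key over a key-sorted list is sorting the mapped list
lemma map_intv_sorted (ys : List String) :
    (PySem.List.sorted ys pvIntv false).map pvIntv
      = PySem.List.sorted (ys.map pvIntv) (fun x => x) false := by
  apply List.Perm.eq_of_pairwise (le := fun a b : Int => a ≤ b)
  · exact fun a b _ _ h1 h2 => le_antisymm h1 h2
  · exact List.pairwise_map.mpr (PySem.List.sorted_pairwise ys pvIntv)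
  · exact PySem.List.sorted_pairwise (ys.map pvIntv) (fun x => x)
  · exact ((PySem.List.sorted_perm ys pvIntv false).map pvIntv).trans
      (PySem.List.sorted_perm (ys.map pvIntv) (fun x => x) false).symm

-- B's numeric block equals A's numeric block
lemma numeric_block (ys : List String) (h : ∀ y ∈ ys, pvNum y = true) :
    ((ys.foldl (fun acc x => PySem.List.insertBy pvKeyLt x acc) []).map pvNorm)
      = (PySem.List.sorted (ys.map pvIntv) (fun x => x) false).map PySem.Int.toStr := by
  have hc : ys.foldl (fun acc x => PySem.List.insertBy pvKeyLt x acc) []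
      = PySem.List.sorted ys pvIntv false := by
    rw [foldl_insertBy_congr pvNum pvKeyLt (fun a b => decide (pvIntv a < pvIntv b))
      (fun a b ha hb => pvKeyLt_num_num ha hb) ys [] h (by simp)]
    exact (PySem.List.sorted_eq_foldl_insertBy ys pvIntv).symm
  rw [hc]
  have hmem : ∀ x ∈ PySem.List.sorted ys pvIntv false, pvNorm x = PySem.Int.toStr (pvIntv x) :=
    fun x hx => pvNorm_num (h x ((PySem.List.mem_sorted _ _ _ _).mp hx))
  rw [List.map_congr_left hmem, ← map_intv_sorted, List.map_map]
  rfl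

-- B's string block equals A's string block
lemma string_block (ys : List String) (h : ∀ y ∈ ys, pvNum y = false) :
    ((ys.foldl (fun acc x => PySem.List.insertBy pvKeyLt x acc) []).map pvNorm)
      = PySem.List.sorted ys (fun x => x) false := by
  have hc : ys.foldl (fun acc x => PySem.List.insertBy pvKeyLt x acc) []
      = PySem.List.sorted ys (fun x => x) false := by
    rw [foldl_insertBy_congr (fun c => !pvNum c) pvKeyLt
      (fun a b : String => decide (a < b))
      (fun a b ha hb => pvKeyLt_str_str (by simpa using ha) (by simpa using hb))
      ys [] (fun y hy => by simp [h y hy]) (by simp)]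
    exact (PySem.List.sorted_eq_foldl_insertBy ys (fun x => x)).symm
  rw [hc]
  have hm := List.map_congr_left (fun x hx =>
    pvNorm_str (h x ((PySem.List.mem_sorted ys (fun x => x) false x).mp hx)))
  simpa using hm

-- ===== VERDICT (by name: the statement is the Claim_ definition above) =====
theorem sort_chroms_spec : Claim_equal_sort_chroms := by
  intro chroms _
  unfold Spec_sort_chroms sort_chroms sort_chroms_alt
  rw [sort_chroms_loop chroms [] []]
  have hsplit := foldl_insertBy_split chroms [] [] (by simp) (by simp)
  simp only [List.nil_append] at hsplit ⊢
  rw [hsplit, List.map_append,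
    numeric_block _ (fun y hy => (List.mem_filter.mp hy).2),
    string_block _ (fun y hy => by simpa using (List.mem_filter.mp hy).2)]
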